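-- pv_equiv track=rewrite | github.com/rhertzog/distro-tracker | distro_tracker/core/utils/compression.py | guess_compression_method
-- ===== SOURCE A (Python) =====
-- def guess_compression_method(filepath):
--     """Given filepath, tries to determine the compression of the file."""
--
--     filepath = filepath.lower()
--
--     extensions_to_method = {
--         ".gz": "gzip",
--         ".bz2": "bzip2",
--         ".xz": "xz",
--     }
--
--     for (ext, method) in extensions_to_method.items():
--         if filepath.endswith(ext):
--             return method
--
--     return None
-- ===== SOURCE B (Python) =====
-- def guess_compression_method(filepath):
--     """Given filepath, tries to determine the compression of the file."""
--     filepath = filepath.lower()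
--     _head, sep, ext = filepath.rpartition('.')
--     if not sep:
--         return None
--     return {"gz": "gzip", "bz2": "bzip2", "xz": "xz"}.get(ext)
-- ===== Notes on version B (the rewrite author's own statement) =====
-- stated objective: idiomatic
-- what changed: B extracts the part after the last dot once with str.rpartition and resolves it by a single dict lookup, instead of A's loop testing endswith for every dict entry.
import Mathlib
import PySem

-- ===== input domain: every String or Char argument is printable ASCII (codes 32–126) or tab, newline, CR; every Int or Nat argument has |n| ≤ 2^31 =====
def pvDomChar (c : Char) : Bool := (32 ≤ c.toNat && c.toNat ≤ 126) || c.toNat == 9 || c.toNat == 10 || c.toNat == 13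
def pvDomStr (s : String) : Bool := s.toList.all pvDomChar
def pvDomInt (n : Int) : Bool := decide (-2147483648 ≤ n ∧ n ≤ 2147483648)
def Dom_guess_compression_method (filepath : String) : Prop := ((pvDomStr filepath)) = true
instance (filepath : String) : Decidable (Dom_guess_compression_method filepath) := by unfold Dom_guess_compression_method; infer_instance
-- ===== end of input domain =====

-- B derives the extension once with rpartition('.') and does a single dict lookup
-- instead of A's endswith-scan over the dict; same return value on every input.

-- ===== PORT A =====
-- the for-loop over extensions_to_method.items() with early return
def pvScanExts (fp : String) : List (String × String) → Option String
  | [] => none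
  | (ext, method) :: rest =>
      if PySem.Str.endswith fp ext then some method else pvScanExts fp rest

def guess_compression_method (filepath : String) : Option String :=
  let fp := PySem.Str.lower filepath
  let extensions_to_method : PySem.Dict String String :=
    (((PySem.Dict.empty).insert ".gz" "gzip").insert ".bz2" "bzip2").insert ".xz" "xz"
  pvScanExts fp extensions_to_method.items

-- ===== PORT B =====
-- hand port of s.rpartition('.') (PySem has no rpartition); exact: splits at the
-- LAST '.', and yields ("", "", s) when there is no '.'
def pvRPartitionDot (s : String) : String × String × String :=
  let cs := s.toList
  if '.' ∈ cs then
    let tail := (cs.reverse.takeWhile (fun c => c ≠ '.')).reverse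
    let head := ((cs.reverse.dropWhile (fun c => c ≠ '.')).drop 1).reverse
    (String.ofList head, ".", String.ofList tail)
  else ("", "", s)

def guess_compression_method_alt (filepath : String) : Option String :=
  let fp := PySem.Str.lower filepath
  let p := pvRPartitionDot fp
  if p.2.1 = "" then none
  else
    ((((PySem.Dict.empty : PySem.Dict String String).insert "gz" "gzip").insert
        "bz2" "bzip2").insert "xz" "xz").get? p.2.2

-- ===== PRECONDITION & SPEC =====
def Spec_guess_compression_method (filepath : String) (out : Option String) : Prop := out = guess_compression_method_alt filepath
instance (filepath : String) (out : Option String) : Decidable (Spec_guess_compression_method filepath out) := by unfold Spec_guess_compression_method; infer_instance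

-- ===== CLAIM (what is proved, stated in full; the proofs are below) =====
def Claim_equal_guess_compression_method : Prop := ∀ (filepath : String), Dom_guess_compression_method filepath → Spec_guess_compression_method filepath (guess_compression_method filepath)

-- ===== LEMMAS AND PROOFS =====

def pvDictB : PySem.Dict String String :=
  (((PySem.Dict.empty : PySem.Dict String String).insert "gz" "gzip").insert
      "bz2" "bzip2").insert "xz" "xz"

-- a dot-free block `d` followed by '.' is a prefix of `r` iff `r` contains a '.'
-- and its chars before the first '.' are exactly `d`
theorem pv_prefix_dot_iff (d : List Char) (hd : '.' ∉ d) (r : List Char) :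
    ((d ++ ['.']) <+: r) ↔ ('.' ∈ r ∧ r.takeWhile (fun c => c ≠ '.') = d) := by
  induction d generalizing r with
  | nil =>
      cases r with
      | nil => simp
      | cons a r' =>
          constructor
          · rintro ⟨t, ht⟩
            have ht' : '.' :: t = a :: r' := by simpa using ht
            have ha : a = '.' := ((List.cons.injEq _ _ _ _).mp ht').1.symm
            subst ha
            refine ⟨List.mem_cons_self, ?_⟩
            rw [List.takeWhile_cons_of_neg (by simp)]
          · rintro ⟨_, htw⟩
            have ha : a = '.' := by
              by_contra hne
              rw [List.takeWhile_cons_of_pos (by simpa using hne)] at htw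
              exact absurd htw (List.cons_ne_nil _ _)
            subst ha
            exact ⟨r', by simp⟩
  | cons x d' ih =>
      have hx : x ≠ '.' := fun h => hd (h ▸ List.mem_cons_self)
      have hd' : '.' ∉ d' := fun h => hd (List.mem_cons_of_mem _ h)
      cases r with
      | nil => simp
      | cons a r' =>
          constructor
          · rintro ⟨t, ht⟩
            simp only [List.cons_append] at ht
            have h1 : x = a := ((List.cons.injEq _ _ _ _).mp ht).1
            have h2 : d' ++ ['.'] ++ t = r' := ((List.cons.injEq _ _ _ _).mp ht).2
            subst h1
            obtain ⟨hm, htw⟩ := (ih hd' r').mp ⟨t, h2⟩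
            refine ⟨List.mem_cons_of_mem _ hm, ?_⟩
            rw [List.takeWhile_cons_of_pos (by simpa using hx), htw]
          · rintro ⟨hm, htw⟩
            have ha : a ≠ '.' := by
              intro h; subst h
              rw [List.takeWhile_cons_of_neg (by simp)] at htw
              exact absurd htw.symm (List.cons_ne_nil _ _)
            rw [List.takeWhile_cons_of_pos (by simpa using ha)] at htw
            have h1 : a = x := ((List.cons.injEq _ _ _ _).mp htw).1
            have h2 : r'.takeWhile (fun c => c ≠ '.') = d' := ((List.cons.injEq _ _ _ _).mp htw).2
            have hm' : '.' ∈ r' := by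
              rcases List.mem_cons.mp hm with h | h
              · exact absurd h.symm ha
              · exact h
            obtain ⟨t, ht⟩ := (ih hd' r').mpr ⟨hm', h2⟩
            exact ⟨t, by simp [h1, ← ht]⟩

-- endswith against a '.'-led extension, phrased via the reversed list
theorem pv_endswith_dot_iff (cs e : List Char) (he : '.' ∉ e) :
    PySem.Chars.endswith cs ('.' :: e) = true ↔
      ('.' ∈ cs ∧ cs.reverse.takeWhile (fun c => c ≠ '.') = e.reverse) := by
  rw [PySem.Chars.endswith_iff]
  have h1 : ('.' :: e) <:+ cs ↔ (e.reverse ++ ['.']) <+: cs.reverse := by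
    rw [← List.reverse_prefix]
    simp
  rw [h1, pv_prefix_dot_iff _ (by simpa using he)]
  simp

theorem pv_ofList_inj {l l2 : List Char} : String.ofList l = String.ofList l2 ↔ l = l2 :=
  ⟨fun h => by simpa using congrArg String.toList h, fun h => by rw [h]⟩

-- common core: A's endswith chain equals B's lookup of the after-last-dot suffix
theorem pv_main (cs : List Char) :
    (if PySem.Chars.endswith cs ['.', 'g', 'z'] then some "gzip"
     else if PySem.Chars.endswith cs ['.', 'b', 'z', '2'] then some "bzip2"
     else if PySem.Chars.endswith cs ['.', 'x', 'z'] then some "xz"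
     else none) =
    (if '.' ∈ cs then
       pvDictB.get? (String.ofList ((cs.reverse.takeWhile (fun c => c ≠ '.')).reverse))
     else none) := by
  have hgz := pv_endswith_dot_iff cs ['g', 'z'] (by decide)
  have hbz := pv_endswith_dot_iff cs ['b', 'z', '2'] (by decide)
  have hxz := pv_endswith_dot_iff cs ['x', 'z'] (by decide)
  by_cases hm : '.' ∈ cs
  · set t := cs.reverse.takeWhile (fun c => c ≠ '.') with ht
    by_cases h1 : t = ['z', 'g']
    · have e := hgz.mpr ⟨hm, by rw [h1]; rfl⟩
      rw [e, if_pos rfl, if_pos hm, h1]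
      decide
    · have e1 : PySem.Chars.endswith cs ['.', 'g', 'z'] = false := by
        rw [Bool.eq_false_iff]; intro h
        exact h1 ((hgz.mp h).2.trans (by decide))
      rw [e1, if_neg (by simp : ¬(false = true))]
      by_cases h2 : t = ['2', 'z', 'b']
      · have e := hbz.mpr ⟨hm, by rw [h2]; rfl⟩
        rw [e, if_pos rfl, if_pos hm, h2]
        decide
      · have e2 : PySem.Chars.endswith cs ['.', 'b', 'z', '2'] = false := by
          rw [Bool.eq_false_iff]; intro h
          exact h2 ((hbz.mp h).2.trans (by decide))
        rw [e2, if_neg (by simp : ¬(false = true))]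
        by_cases h3 : t = ['z', 'x']
        · have e := hxz.mpr ⟨hm, by rw [h3]; rfl⟩
          rw [e, if_pos rfl, if_pos hm, h3]
          decide
        · have e3 : PySem.Chars.endswith cs ['.', 'x', 'z'] = false := by
            rw [Bool.eq_false_iff]; intro h
            exact h3 ((hxz.mp h).2.trans (by decide))
          rw [e3, if_neg (by simp : ¬(false = true)), if_pos hm]
          have k3 : pvDictB.get? (String.ofList t.reverse) = none := by
            have n1 : String.ofList t.reverse ≠ "gz" := by
              intro h
              have := pv_ofList_inj.mp (h.trans (by decide : ("gz" : String) = String.ofList ['g', 'z']))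
              exact h1 (by simpa using congrArg List.reverse this)
            have n2 : String.ofList t.reverse ≠ "bz2" := by
              intro h
              have := pv_ofList_inj.mp (h.trans (by decide : ("bz2" : String) = String.ofList ['b', 'z', '2']))
              exact h2 (by simpa using congrArg List.reverse this)
            have n3 : String.ofList t.reverse ≠ "xz" := by
              intro h
              have := pv_ofList_inj.mp (h.trans (by decide : ("xz" : String) = String.ofList ['x', 'z']))
              exact h3 (by simpa using congrArg List.reverse this)
            unfold pvDictB
            rw [PySem.Dict.get?_insert, if_neg n3, PySem.Dict.get?_insert, if_neg n2,
                PySem.Dict.get?_insert, if_neg n1, PySem.Dict.get?_empty]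
          rw [k3]
  · have e1 : PySem.Chars.endswith cs ['.', 'g', 'z'] = false := by
      rw [Bool.eq_false_iff]; intro h; exact hm (hgz.mp h).1
    have e2 : PySem.Chars.endswith cs ['.', 'b', 'z', '2'] = false := by
      rw [Bool.eq_false_iff]; intro h; exact hm (hbz.mp h).1
    have e3 : PySem.Chars.endswith cs ['.', 'x', 'z'] = false := by
      rw [Bool.eq_false_iff]; intro h; exact hm (hxz.mp h).1
    rw [e1, if_neg (by simp : ¬(false = true)), e2, if_neg (by simp : ¬(false = true)),
        e3, if_neg (by simp : ¬(false = true)), if_neg hm]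

-- A's loop unfolded on the concrete items list
theorem pv_scan_eq (fp : String) :
    pvScanExts fp [(".gz", "gzip"), (".bz2", "bzip2"), (".xz", "xz")] =
      (if PySem.Chars.endswith fp.toList ['.', 'g', 'z'] then some "gzip"
       else if PySem.Chars.endswith fp.toList ['.', 'b', 'z', '2'] then some "bzip2"
       else if PySem.Chars.endswith fp.toList ['.', 'x', 'z'] then some "xz"
       else none) := by
  simp only [pvScanExts, PySem.Str.endswith_eq]
  rw [show (".gz" : String).toList = ['.', 'g', 'z'] from by decide,
      show (".bz2" : String).toList = ['.', 'b', 'z', '2'] from by decide,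
      show (".xz" : String).toList = ['.', 'x', 'z'] from by decide]

-- B's rpartition-then-lookup reduced to the same right-hand side as pv_main
theorem pv_alt_eq (fp : String) :
    (if (pvRPartitionDot fp).2.1 = "" then none
     else pvDictB.get? (pvRPartitionDot fp).2.2) =
      (if '.' ∈ fp.toList then
         pvDictB.get? (String.ofList ((fp.toList.reverse.takeWhile (fun c => c ≠ '.')).reverse))
       else none) := by
  by_cases hm : '.' ∈ fp.toList
  · have hp : pvRPartitionDot fp =
        (String.ofList (((fp.toList.reverse.dropWhile (fun c => c ≠ '.')).drop 1).reverse), ".",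
          String.ofList ((fp.toList.reverse.takeWhile (fun c => c ≠ '.')).reverse)) := by
      unfold pvRPartitionDot
      simp [hm]
    rw [hp, if_pos hm]
    rw [if_neg (show ¬(("." : String) = "") from by decide)]
  · have hp : pvRPartitionDot fp = ("", "", fp) := by
      unfold pvRPartitionDot
      simp [hm]
    rw [hp, if_neg hm, if_pos rfl]

-- ===== VERDICT (by name: the statement is the Claim_ definition above) =====
theorem guess_compression_method_spec : Claim_equal_guess_compression_method := by
  intro filepath _
  show pvScanExts (PySem.Str.lower filepath) [(".gz", "gzip"), (".bz2", "bzip2"), (".xz", "xz")] =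
    (if (pvRPartitionDot (PySem.Str.lower filepath)).2.1 = "" then none
     else pvDictB.get? (pvRPartitionDot (PySem.Str.lower filepath)).2.2)
  rw [pv_scan_eq, pv_main, pv_alt_eq]
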